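-- pv_equiv track=rewrite | github.com/2Hasan2/Every-Day-problem | ICPC/003/move_brackets.py | minimum_moves_to_rbs
-- ===== SOURCE A (Python) =====
-- def minimum_moves_to_rbs(t, test_cases):
--     results = []
--     for n, s in test_cases:
--         balance = 0
--         min_balance = 0
--
--         for char in s:
--             if char == '(':
--                 balance += 1
--             else:
--                 balance -= 1
--             min_balance = min(min_balance, balance)
--
--         results.append(abs(min_balance))
--
--     return results
-- ===== SOURCE B (Python) =====
-- def _residue(s):
--     # reduce the string by cancelling matched "()" pairs with an explicit stack;
--     # any non-'(' character plays the role of ')' (as in the original judge)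
--     stack = []
--     for ch in s:
--         b = '(' if ch == '(' else ')'
--         if b == ')' and stack and stack[-1] == '(':
--             stack.pop()
--         else:
--             stack.append(b)
--     return stack
--
-- def minimum_moves_to_rbs(t, test_cases):
--     # the irreducible residue looks like ")))...(((" ; the unmatched closes are the answer
--     return [_residue(s).count(')') for n, s in test_cases]
-- ===== Notes on version B (the rewrite author's own statement) =====
-- stated objective: alternative
-- what changed: Instead of tracking a running balance and its minimum, B reduces each string with an explicit stack that cancels matched '()' pairs, then counts the ')' characters left in the irreducible residue; the result is built by a list comprehension over a helper rather than an accumulator loop.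
import Mathlib
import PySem

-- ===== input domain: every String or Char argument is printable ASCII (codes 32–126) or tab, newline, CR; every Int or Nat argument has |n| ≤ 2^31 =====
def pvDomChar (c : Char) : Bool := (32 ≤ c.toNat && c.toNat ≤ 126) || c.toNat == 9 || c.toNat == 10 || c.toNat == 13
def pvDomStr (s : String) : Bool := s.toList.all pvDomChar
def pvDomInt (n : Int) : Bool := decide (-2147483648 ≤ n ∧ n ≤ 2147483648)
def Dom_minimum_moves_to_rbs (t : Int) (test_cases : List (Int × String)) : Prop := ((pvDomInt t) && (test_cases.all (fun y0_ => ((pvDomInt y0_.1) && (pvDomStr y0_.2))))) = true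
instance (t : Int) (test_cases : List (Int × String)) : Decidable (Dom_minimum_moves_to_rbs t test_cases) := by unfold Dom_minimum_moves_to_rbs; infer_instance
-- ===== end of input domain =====

-- B replaces A's running-balance-and-minimum scan by explicit stack reduction:
-- cancel matched "()" pairs, then count the ')' left in the residue; same cost.

-- ===== PORT A =====
-- inner loop of A: state = (balance, min_balance)
def pvStepA (st : Int × Int) (c : Char) : Int × Int :=
  let balance := if c = '(' then st.1 + 1 else st.1 - 1
  (balance, min st.2 balance)

def minimum_moves_to_rbs (t : Int) (test_cases : List (Int × String)) : List Int :=
  test_cases.foldl (fun results p =>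
    let bm := p.2.toList.foldl pvStepA (0, 0)
    results ++ [|bm.2|]) []

-- ===== PORT B =====
-- one step of the stack reduction: push, unless a ')' meets a pending '(' on top
def pvResidueStep (stack : List Char) (ch : Char) : List Char :=
  let b := if ch = '(' then '(' else ')'
  if b = ')' ∧ stack ≠ [] ∧ stack.getLast? = some '(' then stack.dropLast
  else stack ++ [b]

def pvResidue (s : String) : List Char := s.toList.foldl pvResidueStep []

def minimum_moves_to_rbs_alt (t : Int) (test_cases : List (Int × String)) : List Int :=
  test_cases.map (fun p => ((pvResidue p.2).count ')' : Int))

-- ===== PRECONDITION & SPEC =====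
def Spec_minimum_moves_to_rbs (t : Int) (test_cases : List (Int × String)) (out : List Int) : Prop := out = minimum_moves_to_rbs_alt t test_cases
instance (t : Int) (test_cases : List (Int × String)) (out : List Int) : Decidable (Spec_minimum_moves_to_rbs t test_cases out) := by unfold Spec_minimum_moves_to_rbs; infer_instance

-- ===== CLAIM =====
def Claim_equal_minimum_moves_to_rbs : Prop := ∀ (t : Int) (test_cases : List (Int × String)), Dom_minimum_moves_to_rbs t test_cases → Spec_minimum_moves_to_rbs t test_cases (minimum_moves_to_rbs t test_cases)

-- ===== LEMMAS AND PROOFS =====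

-- Invariant: if A's state is (b, m) with m ≤ 0 ≤ b - m, B's stack is the residue
-- (-m) copies of ')' followed by (b - m) copies of '(', and this is preserved.
lemma pvInner (cs : List Char) : ∀ b m : Int, m ≤ 0 → m ≤ b →
    cs.foldl pvResidueStep
        (List.replicate (-m).toNat ')' ++ List.replicate (b - m).toNat '(')
      = List.replicate (-(cs.foldl pvStepA (b, m)).2).toNat ')'
          ++ List.replicate ((cs.foldl pvStepA (b, m)).1 - (cs.foldl pvStepA (b, m)).2).toNat '('
    ∧ (cs.foldl pvStepA (b, m)).2 ≤ 0
    ∧ (cs.foldl pvStepA (b, m)).2 ≤ (cs.foldl pvStepA (b, m)).1 := by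
  induction cs with
  | nil => intro b m h0 hb; exact ⟨rfl, h0, hb⟩
  | cons c cs ih =>
    intro b m h0 hb
    by_cases hc : c = '('
    · have hmin : min m (b + 1) = m := min_eq_left (by omega)
      have hA : pvStepA (b, m) c = (b + 1, m) := by simp [pvStepA, hc, hmin]
      have hB : pvResidueStep
          (List.replicate (-m).toNat ')' ++ List.replicate (b - m).toNat '(') c
          = List.replicate (-m).toNat ')' ++ List.replicate (b + 1 - m).toNat '(' := by
        have : (b + 1 - m).toNat = (b - m).toNat + 1 := by omega
        simp [pvResidueStep, hc, this, List.replicate_succ',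
          List.append_assoc]
      simp only [List.foldl_cons, hA, hB]
      exact ih (b + 1) m h0 (by omega)
    · by_cases hlt : m < b
      · -- stack top is '(' : pop it
        have hmin : min m (b - 1) = m := by omega
        have hA : pvStepA (b, m) c = (b - 1, m) := by simp [pvStepA, hc, hmin]
        have hpos : (b - m).toNat = (b - 1 - m).toNat + 1 := by omega
        have hstack : List.replicate (-m).toNat ')' ++ List.replicate (b - m).toNat '('
            = (List.replicate (-m).toNat ')' ++ List.replicate (b - 1 - m).toNat '(') ++ ['('] := by
          rw [hpos, List.replicate_succ', List.append_assoc]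
        have hB : pvResidueStep
            (List.replicate (-m).toNat ')' ++ List.replicate (b - m).toNat '(') c
            = List.replicate (-m).toNat ')' ++ List.replicate (b - 1 - m).toNat '(' := by
          rw [hstack]
          simp [pvResidueStep, hc]
        simp only [List.foldl_cons, hA, hB]
        exact ih (b - 1) m h0 (by omega)
      · -- no pending '(' : push a ')'
        have hbm : b = m := by omega
        have hmin : min m (b - 1) = m - 1 := by omega
        have hA : pvStepA (b, m) c = (b - 1, m - 1) := by simp [pvStepA, hc, hmin]
        have hz : (b - m).toNat = 0 := by omega
        have hlast : (List.replicate (-m).toNat ')').getLast? ≠ some '(' := by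
          cases hn : (-m).toNat with
          | zero => simp
          | succ n => rw [List.replicate_succ']; simp
        have hB : pvResidueStep
            (List.replicate (-m).toNat ')' ++ List.replicate (b - m).toNat '(') c
            = List.replicate (-(m - 1)).toNat ')' ++ List.replicate (b - 1 - (m - 1)).toNat '(' := by
          have h1 : (-(m - 1)).toNat = (-m).toNat + 1 := by omega
          have h2 : (b - 1 - (m - 1)).toNat = 0 := by omega
          simp only [pvResidueStep, hc, if_neg (by trivial : ¬ c = '('), hz,
            List.replicate_zero, List.append_nil, h1, h2,
            List.replicate_succ']
          rw [if_neg (by simp [hlast])]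
          simp [List.replicate_succ']
        simp only [List.foldl_cons, hA, hB]
        exact ih (b - 1) (m - 1) (by omega) (by omega)

-- Per test case: |min prefix balance| = count of ')' in the residue.
lemma pvCase (s : String) :
    |(s.toList.foldl pvStepA (0, 0)).2| = ((pvResidue s).count ')' : Int) := by
  have h := pvInner s.toList 0 0 le_rfl le_rfl
  have h0 : List.replicate (-(0:Int)).toNat ')' ++ List.replicate ((0:Int) - 0).toNat '(' = ([] : List Char) := by decide
  unfold pvResidue
  rw [← h0, h.1]
  have hm := h.2.1
  rw [List.count_append, List.count_replicate, List.count_replicate]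
  simp only [abs_of_nonpos hm]
  have : ((-(s.toList.foldl pvStepA (0, 0)).2).toNat : Int) = -(s.toList.foldl pvStepA (0, 0)).2 := by omega
  simp [this]

-- A's accumulator fold is the map B computes.
lemma pvOuter (tcs : List (Int × String)) : ∀ acc : List Int,
    tcs.foldl (fun results p =>
      let bm := p.2.toList.foldl pvStepA (0, 0)
      results ++ [|bm.2|]) acc
    = acc ++ tcs.map (fun p => ((pvResidue p.2).count ')' : Int)) := by
  induction tcs with
  | nil => intro acc; simp
  | cons p tcs ih =>
    intro acc
    simp only [List.foldl_cons, List.map_cons]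
    rw [ih, pvCase p.2, List.append_assoc]
    rfl

-- ===== VERDICT =====
theorem minimum_moves_to_rbs_spec : Claim_equal_minimum_moves_to_rbs := by
  intro t tcs _
  unfold Spec_minimum_moves_to_rbs minimum_moves_to_rbs minimum_moves_to_rbs_alt
  simpa using pvOuter tcs []
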